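-- pv_equiv track=rewrite | github.com/Tanveer1824/markaz-ai | knowledge/docling/5-chat.py | detect_chart_type
-- ===== SOURCE A (Python) =====
-- def detect_chart_type(user_input: str) -> str:
--     """Detect the preferred chart type from user input"""
--     user_input_lower = user_input.lower()
--
--     # Check for explicit chart type requests first (highest priority)
--     if 'bar chart' in user_input_lower or 'bar graph' in user_input_lower:
--         return 'bar'
--     elif 'pie chart' in user_input_lower or 'pie graph' in user_input_lower:
--         return 'pie'
--     elif 'line chart' in user_input_lower or 'line graph' in user_input_lower:
--         return 'line'
--     elif 'scatter plot' in user_input_lower or 'scatter chart' in user_input_lower: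
--         return 'scatter'
--     elif 'area chart' in user_input_lower or 'area graph' in user_input_lower:
--         return 'area'
--
--     # Check for trend-related terms that suggest line charts
--     if any(word in user_input_lower for word in ['trend', 'over time', 'time series', 'quarterly', 'monthly', 'yearly']):
--         return 'line'
--
--     # Then check for individual keywords
--     if any(word in user_input_lower for word in ['bar', 'column', 'vertical', 'horizontal']):
--         return 'bar'
--     elif any(word in user_input_lower for word in ['pie', 'circle', 'donut', 'sector']):
--         return 'pie'
--     elif any(word in user_input_lower for word in ['line']):
--         return 'line'
--     elif any(word in user_input_lower for word in ['scatter', 'point', 'correlation']):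
--         return 'scatter'
--     elif any(word in user_input_lower for word in ['area', 'filled']):
--         return 'area'
--
--     # If no specific chart type mentioned, default to line chart for trends, bar for others
--     if 'trend' in user_input_lower or 'over time' in user_input_lower:
--         return 'line'
--     else:
--         return 'bar'
-- ===== SOURCE B (Python) =====
-- # Flattened pattern table: (substring, priority, label).  Lower priority wins;
-- # ties in priority always carry the same label, so min() is unambiguous.
-- _PATTERNS = [
--     ("bar chart", 0, "bar"), ("bar graph", 0, "bar"),
--     ("pie chart", 1, "pie"), ("pie graph", 1, "pie"),
--     ("line chart", 2, "line"), ("line graph", 2, "line"),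
--     ("scatter plot", 3, "scatter"), ("scatter chart", 3, "scatter"),
--     ("area chart", 4, "area"), ("area graph", 4, "area"),
--     ("trend", 5, "line"), ("over time", 5, "line"), ("time series", 5, "line"),
--     ("quarterly", 5, "line"), ("monthly", 5, "line"), ("yearly", 5, "line"),
--     ("bar", 6, "bar"), ("column", 6, "bar"), ("vertical", 6, "bar"), ("horizontal", 6, "bar"),
--     ("pie", 7, "pie"), ("circle", 7, "pie"), ("donut", 7, "pie"), ("sector", 7, "pie"),
--     ("line", 8, "line"),
--     ("scatter", 9, "scatter"), ("point", 9, "scatter"), ("correlation", 9, "scatter"),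
--     ("area", 10, "area"), ("filled", 10, "area"),
-- ]
--
-- def detect_chart_type(user_input: str) -> str:
--     """Detect the preferred chart type from user input"""
--     lo = user_input.lower()
--     hits = [(prio, label) for (pat, prio, label) in _PATTERNS if pat in lo]
--     return min(hits, default=(11, "bar"))[1]
-- ===== Notes on version B (the rewrite author's own statement) =====
-- stated objective: alternative
-- what changed: Replaced the ordered first-match if/elif scan (whose final trend fallback is dead code) by a flattened (substring, priority, label) table: B collects ALL matching patterns and returns the label of the minimum-priority hit via min() with a default, instead of returning at the first match.
import Mathlib
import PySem

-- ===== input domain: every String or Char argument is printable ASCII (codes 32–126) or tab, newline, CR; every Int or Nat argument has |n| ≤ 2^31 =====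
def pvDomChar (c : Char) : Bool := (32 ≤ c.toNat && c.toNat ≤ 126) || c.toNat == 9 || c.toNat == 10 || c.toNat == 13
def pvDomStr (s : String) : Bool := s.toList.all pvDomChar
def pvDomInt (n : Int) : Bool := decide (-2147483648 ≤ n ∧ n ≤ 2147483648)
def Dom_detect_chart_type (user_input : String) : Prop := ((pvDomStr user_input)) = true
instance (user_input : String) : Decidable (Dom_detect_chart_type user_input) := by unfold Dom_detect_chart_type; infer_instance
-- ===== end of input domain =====

-- B replaces A's ordered first-match if/elif scan by a flattened (substring, priority, label)
-- table: collect ALL matching patterns, return the label of the minimum-priority hit (default "bar").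

-- ===== PORT A =====
def detect_chart_type (user_input : String) : String :=
  let lo := PySem.Str.lower user_input
  if PySem.Str.isIn "bar chart" lo || PySem.Str.isIn "bar graph" lo then "bar"
  else if PySem.Str.isIn "pie chart" lo || PySem.Str.isIn "pie graph" lo then "pie"
  else if PySem.Str.isIn "line chart" lo || PySem.Str.isIn "line graph" lo then "line"
  else if PySem.Str.isIn "scatter plot" lo || PySem.Str.isIn "scatter chart" lo then "scatter"
  else if PySem.Str.isIn "area chart" lo || PySem.Str.isIn "area graph" lo then "area"
  else if (["trend", "over time", "time series", "quarterly", "monthly", "yearly"] : List String).any (fun w => PySem.Str.isIn w lo) then "line"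
  else if (["bar", "column", "vertical", "horizontal"] : List String).any (fun w => PySem.Str.isIn w lo) then "bar"
  else if (["pie", "circle", "donut", "sector"] : List String).any (fun w => PySem.Str.isIn w lo) then "pie"
  else if (["line"] : List String).any (fun w => PySem.Str.isIn w lo) then "line"
  else if (["scatter", "point", "correlation"] : List String).any (fun w => PySem.Str.isIn w lo) then "scatter"
  else if (["area", "filled"] : List String).any (fun w => PySem.Str.isIn w lo) then "area"
  else if PySem.Str.isIn "trend" lo || PySem.Str.isIn "over time" lo then "line"
  else "bar"

-- ===== PORT B =====
def pvPatterns : List (String × Int × String) :=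
  [ ("bar chart", 0, "bar"), ("bar graph", 0, "bar"),
    ("pie chart", 1, "pie"), ("pie graph", 1, "pie"),
    ("line chart", 2, "line"), ("line graph", 2, "line"),
    ("scatter plot", 3, "scatter"), ("scatter chart", 3, "scatter"),
    ("area chart", 4, "area"), ("area graph", 4, "area"),
    ("trend", 5, "line"), ("over time", 5, "line"), ("time series", 5, "line"),
    ("quarterly", 5, "line"), ("monthly", 5, "line"), ("yearly", 5, "line"),
    ("bar", 6, "bar"), ("column", 6, "bar"), ("vertical", 6, "bar"), ("horizontal", 6, "bar"),
    ("pie", 7, "pie"), ("circle", 7, "pie"), ("donut", 7, "pie"), ("sector", 7, "pie"),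
    ("line", 8, "line"),
    ("scatter", 9, "scatter"), ("point", 9, "scatter"), ("correlation", 9, "scatter"),
    ("area", 10, "area"), ("filled", 10, "area") ]

def detect_chart_type_alt (user_input : String) : String :=
  let lo := PySem.Str.lower user_input
  let hits := pvPatterns.filterMap (fun t => if PySem.Str.isIn t.1 lo then some (t.2.1, t.2.2) else none)
  ((PySem.List.min2? hits (fun h => h.1) (fun h => h.2)).getD (11, "bar")).2

-- ===== PRECONDITION & SPEC =====
def Spec_detect_chart_type (user_input : String) (out : String) : Prop := out = detect_chart_type_alt user_input
instance (user_input : String) (out : String) : Decidable (Spec_detect_chart_type user_input out) := by unfold Spec_detect_chart_type; infer_instance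

-- ===== CLAIM (what is proved, stated in full; the proofs are below) =====
def Claim_equal_detect_chart_type : Prop := ∀ (user_input : String), Dom_detect_chart_type user_input → Spec_detect_chart_type user_input (detect_chart_type user_input)

-- ===== LEMMAS AND PROOFS =====

-- generic: a fold keeps its accumulator when the step fixes it on every later element
theorem pv_fold_keep {α : Type} (f : Option α → α → Option α) (m : α) (t : List α)
    (hf : ∀ x ∈ t, f (some m) x = some m) :
    t.foldl f (some m) = some m := by
  induction t with
  | nil => rfl
  | cons y t ih =>
      rw [List.foldl_cons, hf y (List.mem_cons_self)]
      exact ih (fun x hx => hf x (List.mem_cons_of_mem _ hx))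

-- first-match scan over a pattern table (the shape of A's chain)
def pvScan (lo : String) : List (String × Int × String) → String
  | [] => "bar"
  | (pat, _, lab) :: rest => if PySem.Str.isIn pat lo then lab else pvScan lo rest

-- collect-all-then-argmin equals the first-match scan when priorities are nondecreasing
-- along the table and equal priorities carry equal labels
theorem pv_min_eq_scan (lo : String) (l : List (String × Int × String))
    (h : l.Pairwise (fun a b => a.2.1 < b.2.1 ∨ (a.2.1 = b.2.1 ∧ a.2.2 = b.2.2))) :
    ((PySem.List.min2? (l.filterMap (fun t => if PySem.Str.isIn t.1 lo then some (t.2.1, t.2.2) else none))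
        (fun h => h.1) (fun h => h.2)).getD (11, "bar")).2 = pvScan lo l := by
  induction l with
  | nil => rfl
  | cons a l ih =>
      obtain ⟨pat, p, lab⟩ := a
      rw [List.pairwise_cons] at h
      by_cases hin : PySem.Str.isIn pat lo
      · simp only [List.filterMap_cons, hin, if_pos, pvScan]
        have hall : ∀ x ∈ l.filterMap (fun t => if PySem.Str.isIn t.1 lo then some (t.2.1, t.2.2) else none),
            ¬(x.1 < p) ∧ (¬(p < x.1) → ¬(x.2 < lab)) := by
          intro x hx
          rw [List.mem_filterMap] at hx
          obtain ⟨t, ht, hft⟩ := hx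
          by_cases h2 : PySem.Str.isIn t.1 lo
          · rw [if_pos h2] at hft
            injection hft with hft
            subst hft
            have hrel := h.1 t ht
            dsimp only at hrel
            rcases hrel with h1 | ⟨h1, h2'⟩
            · exact ⟨not_lt_of_gt h1, fun c => absurd h1 c⟩
            · exact ⟨by rw [h1]; exact lt_irrefl _, fun _ => by rw [h2']; exact lt_irrefl _⟩
          · rw [if_neg h2] at hft
            simp at hft
        simp only [PySem.List.min2?, List.foldl_cons]
        rw [pv_fold_keep _ (p, lab) _ ?_]
        · rfl
        · intro x hx
          have hx' := hall x hx
          have hcond : (decide (x.1 < (p, lab).1) || !decide ((p, lab).1 < x.1) && decide (x.2 < (p, lab).2)) = false := by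
            by_cases hlt : p < x.1
            · simp [hx'.1, hlt]
            · simp [hx'.1, hlt, hx'.2 hlt]
          show (if _ = true then _ else _) = _
          rw [hcond]
          simp
      · simp only [List.filterMap_cons, hin, if_neg, Bool.false_eq_true, not_false_iff, pvScan]
        exact ih h.2

-- (if a || b then x else y) splits into two sequential ifs
theorem pv_if_or {α : Type} (a b : Bool) (x y : α) :
    (if (a || b) = true then x else y) = if a = true then x else if b = true then x else y := by
  cases a <;> simp

-- A's chain equals the first-match scan of the flattened table
-- (A's final 'trend'/'over time' branch is dead: both were tested in the trend tier)
theorem pvA_eq_scan (lo : String) :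
    (if PySem.Str.isIn "bar chart" lo || PySem.Str.isIn "bar graph" lo then "bar"
     else if PySem.Str.isIn "pie chart" lo || PySem.Str.isIn "pie graph" lo then "pie"
     else if PySem.Str.isIn "line chart" lo || PySem.Str.isIn "line graph" lo then "line"
     else if PySem.Str.isIn "scatter plot" lo || PySem.Str.isIn "scatter chart" lo then "scatter"
     else if PySem.Str.isIn "area chart" lo || PySem.Str.isIn "area graph" lo then "area"
     else if (["trend", "over time", "time series", "quarterly", "monthly", "yearly"] : List String).any (fun w => PySem.Str.isIn w lo) then "line"
     else if (["bar", "column", "vertical", "horizontal"] : List String).any (fun w => PySem.Str.isIn w lo) then "bar"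
     else if (["pie", "circle", "donut", "sector"] : List String).any (fun w => PySem.Str.isIn w lo) then "pie"
     else if (["line"] : List String).any (fun w => PySem.Str.isIn w lo) then "line"
     else if (["scatter", "point", "correlation"] : List String).any (fun w => PySem.Str.isIn w lo) then "scatter"
     else if (["area", "filled"] : List String).any (fun w => PySem.Str.isIn w lo) then "area"
     else if PySem.Str.isIn "trend" lo || PySem.Str.isIn "over time" lo then "line"
     else "bar") = pvScan lo pvPatterns := by
  simp only [pvPatterns, pvScan, List.any_cons, List.any_nil, Bool.or_false, pv_if_or]
  by_cases t1 : PySem.Str.isIn "trend" lo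
  · simp only [t1, if_true]
  · by_cases t2 : PySem.Str.isIn "over time" lo
    · simp only [t1, t2, if_true, Bool.false_eq_true, if_false]
    · simp only [t1, t2, Bool.false_eq_true, if_false]

theorem detect_chart_type_eq_alt (user_input : String) :
    detect_chart_type user_input = detect_chart_type_alt user_input := by
  unfold detect_chart_type detect_chart_type_alt
  rw [pv_min_eq_scan _ pvPatterns (by decide), pvA_eq_scan]

-- ===== VERDICT (by name: the statement is the Claim_ definition above) =====
theorem detect_chart_type_spec : Claim_equal_detect_chart_type := by
  intro s _
  exact detect_chart_type_eq_alt s
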